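-- pv_equiv track=rewrite | github.com/dtbinh/OpenCourse | ConvexOptimization/BoydStanfordUniversity/www.seas.ucla.edu/~vandenbe/software/conic_dcmp/symbolic.py | __leaf
-- ===== SOURCE A (Python) =====
-- def __leaf(i, j, first, maxfirst, prevleaf, ancestor):
--     """
--     Determine if j is leaf of i'th row subtree.
--     """
--     jleaf = 0
--     if i<=j or first[j] <= maxfirst[i]: return -1, jleaf
--     maxfirst[i] = first[j]
--     jprev = prevleaf[i]
--     prevleaf[i] = j
--     if jprev == -1: jleaf = 1
--     else: jleaf = 2
--     if jleaf == 1: return i, jleaf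
--     q = jprev
--     while q != ancestor[q]: q = ancestor[q]
--     s = jprev
--     while s != q:
--         sparent = ancestor[s]
--         ancestor[s] = q
--         s = sparent
--     return q, jleaf
-- ===== SOURCE B (Python) =====
-- def __leaf(i, j, first, maxfirst, prevleaf, ancestor):
--     """
--     Determine if j is leaf of i'th row subtree.
--
--     Same return values and same in-place updates as the original, but the
--     two while loops (root search, then compression pass) are replaced by a
--     single recursive find with full path compression on the unwind.
--     """
--     if i <= j or first[j] <= maxfirst[i]:
--         return -1, 0
--     maxfirst[i] = first[j]
--     jprev = prevleaf[i]
--     prevleaf[i] = j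
--     if jprev == -1:
--         return i, 1
--
--     def find(x):
--         p = ancestor[x]
--         if p == x:
--             return x
--         r = find(p)
--         ancestor[x] = r
--         return r
--
--     return find(jprev), 2
-- ===== Notes on version B (the rewrite author's own statement) =====
-- stated objective: alternative
-- what changed: A's two while loops (iterative root chase followed by a separate compression pass) are replaced by one recursive find that chases to the root on the way down and applies full path compression on the unwind; return value and final arrays are identical.
-- outside the precondition, e.g. on __leaf(1, 0, [5], [0, 0], [0, 0], [0, 0]): A returns (0, 2), B returns (0, 2)
import Mathlib
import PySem

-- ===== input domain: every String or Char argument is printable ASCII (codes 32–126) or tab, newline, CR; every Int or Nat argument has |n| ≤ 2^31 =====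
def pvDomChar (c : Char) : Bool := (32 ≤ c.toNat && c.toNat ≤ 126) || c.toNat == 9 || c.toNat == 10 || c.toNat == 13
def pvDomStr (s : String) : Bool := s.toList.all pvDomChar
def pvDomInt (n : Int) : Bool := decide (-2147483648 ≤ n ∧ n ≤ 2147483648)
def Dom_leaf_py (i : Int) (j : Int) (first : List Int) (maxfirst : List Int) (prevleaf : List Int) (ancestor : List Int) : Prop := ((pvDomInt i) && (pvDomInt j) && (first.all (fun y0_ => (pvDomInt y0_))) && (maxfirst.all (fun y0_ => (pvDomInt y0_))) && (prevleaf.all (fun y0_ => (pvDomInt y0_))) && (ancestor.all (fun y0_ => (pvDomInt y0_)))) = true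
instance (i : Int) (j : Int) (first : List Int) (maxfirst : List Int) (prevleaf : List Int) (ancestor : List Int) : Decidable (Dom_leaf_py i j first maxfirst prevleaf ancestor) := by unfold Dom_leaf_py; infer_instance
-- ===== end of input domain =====

-- B replaces A's two while loops (root chase, then compression pass) by one recursive
-- find with full path compression on the unwind: same return value, same final arrays.
-- A (and B) mutate maxfirst/prevleaf/ancestor in place; the equivalence proved here is
-- about the RETURN value (q, jleaf) only, so the ports do not thread those writes that
-- cannot influence it (the compression writes are modelled but their result is unread,
-- exactly as it is unread in the returned pair).

-- ===== PORT A =====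
-- Python list assignment ancestor[s] = v (negative index wraps; out of range leaves the
-- list unchanged — inside Pre_ the index is always in range, so this is exact there).
def pvAssign (xs : List Int) (idx v : Int) : List Int :=
  if 0 ≤ idx then xs.set idx.toNat v
  else xs.set (xs.length + idx).toNat v

-- 'q = jprev; while q != ancestor[q]: q = ancestor[q]' (fuel makes the loop total; inside
-- Pre_ the ancestor array points strictly upward, so fuel (length+1) is never exhausted).
def pvRootLoopA (anc : List Int) : Nat → Int → Int
  | 0, q => q
  | fuel+1, q =>
      let a := (PySem.List.pyGet? anc q).getD q
      if q = a then q else pvRootLoopA anc fuel a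

-- 's = jprev; while s != q: sparent = ancestor[s]; ancestor[s] = q; s = sparent'
def pvCompressLoopA (q : Int) : Nat → Int → List Int → List Int
  | 0, _, anc => anc
  | fuel+1, s, anc =>
      if s = q then anc
      else
        let sparent := (PySem.List.pyGet? anc s).getD s
        pvCompressLoopA q fuel sparent (pvAssign anc s q)

def leaf_py (i : Int) (j : Int) (first : List Int) (maxfirst : List Int) (prevleaf : List Int) (ancestor : List Int) : Int × Int :=
  if i ≤ j ∨ (PySem.List.pyGet? first j).getD 0 ≤ (PySem.List.pyGet? maxfirst i).getD 0 then
    (-1, 0)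
  else
    let jprev := (PySem.List.pyGet? prevleaf i).getD 0
    if jprev = -1 then (i, 1)
    else
      let q := pvRootLoopA ancestor (ancestor.length + 1) jprev
      let _anc := pvCompressLoopA q (ancestor.length + 1) jprev ancestor
      (q, 2)

-- ===== PORT B =====
-- recursive 'find(x): p = ancestor[x]; if p == x: return x; r = find(p); ancestor[x] = r; return r'
-- (reads happen on the way down, before any write; writes are applied on the unwind)
def pvFindB : Nat → Int → List Int → Int × List Int
  | 0, x, anc => (x, anc)
  | fuel+1, x, anc =>
      let p := (PySem.List.pyGet? anc x).getD x
      if p = x then (x, anc)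
      else
        let r := pvFindB fuel p anc
        (r.1, pvAssign r.2 x r.1)

def leaf_py_alt (i : Int) (j : Int) (first : List Int) (maxfirst : List Int) (prevleaf : List Int) (ancestor : List Int) : Int × Int :=
  if i ≤ j ∨ (PySem.List.pyGet? first j).getD 0 ≤ (PySem.List.pyGet? maxfirst i).getD 0 then
    (-1, 0)
  else
    let jprev := (PySem.List.pyGet? prevleaf i).getD 0
    if jprev = -1 then (i, 1)
    else
      ((pvFindB (ancestor.length + 1) jprev ancestor).1, 2)

-- ===== PRECONDITION & SPEC =====
-- Pre_ excludes inputs on which Python A raises IndexError (an index it reads is out of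
-- range) or loops forever (a cycle in the ancestor chain); termination is guaranteed by
-- the elimination-tree invariant k ≤ ancestor[k] < len, which also excludes some acyclic
-- non-monotone ancestor arrays on which A happens to return (see claim cites).
def Pre_leaf_py (i : Int) (j : Int) (first : List Int) (maxfirst : List Int) (prevleaf : List Int) (ancestor : List Int) : Prop :=
  i ≤ j ∨
  (PySem.Raise.InRange first.length j ∧ PySem.Raise.InRange maxfirst.length i ∧
   ((PySem.List.pyGet? first j).getD 0 ≤ (PySem.List.pyGet? maxfirst i).getD 0 ∨
    (PySem.Raise.InRange prevleaf.length i ∧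
     ((PySem.List.pyGet? prevleaf i).getD 0 = -1 ∨
      (PySem.Raise.InRange ancestor.length ((PySem.List.pyGet? prevleaf i).getD 0) ∧
       ∀ k : Nat, k < ancestor.length →
         (k : Int) ≤ (PySem.List.pyGet? ancestor (k : Int)).getD 0 ∧
         (PySem.List.pyGet? ancestor (k : Int)).getD 0 < (ancestor.length : Int))))))

instance (i : Int) (j : Int) (first : List Int) (maxfirst : List Int) (prevleaf : List Int) (ancestor : List Int) : Decidable (Pre_leaf_py i j first maxfirst prevleaf ancestor) := by unfold Pre_leaf_py; infer_instance

def pvWitness_leaf_py : Int × Int × List Int × List Int × List Int × List Int :=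
  (2, 0, [5, 0, 0], [0, 0, 0], [0, 0, 0], [1, 2, 2])

def Spec_leaf_py (i : Int) (j : Int) (first : List Int) (maxfirst : List Int) (prevleaf : List Int) (ancestor : List Int) (out : Int × Int) : Prop := out = leaf_py_alt i j first maxfirst prevleaf ancestor
instance (i : Int) (j : Int) (first : List Int) (maxfirst : List Int) (prevleaf : List Int) (ancestor : List Int) (out : Int × Int) : Decidable (Spec_leaf_py i j first maxfirst prevleaf ancestor out) := by unfold Spec_leaf_py; infer_instance

-- ===== CLAIM (what is proved, stated in full; the proofs are below) =====
def Claim_equal_leaf_py : Prop := ∀ (i : Int) (j : Int) (first : List Int) (maxfirst : List Int) (prevleaf : List Int) (ancestor : List Int), Dom_leaf_py i j first maxfirst prevleaf ancestor → Pre_leaf_py i j first maxfirst prevleaf ancestor → Spec_leaf_py i j first maxfirst prevleaf ancestor (leaf_py i j first maxfirst prevleaf ancestor)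

-- ===== LEMMAS AND PROOFS =====

-- A's iterative root chase and B's recursive find (both reading the untouched array on
-- the way down) compute the same root.
theorem pvRootLoopA_eq_findB (fuel : Nat) : ∀ (anc : List Int) (q : Int), pvRootLoopA anc fuel q = (pvFindB fuel q anc).1 := by
  induction fuel with
  | zero => intro anc q; rfl
  | succ n ih =>
      intro anc q
      simp only [pvRootLoopA, pvFindB]
      by_cases h : (PySem.List.pyGet? anc q).getD q = q
      · simp [h]
      · have h' : ¬ q = (PySem.List.pyGet? anc q).getD q := fun hh => h hh.symm
        simp [h, h', ih]

-- ===== VERDICT (by name: the statement is the Claim_ definition above) =====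
theorem leaf_py_spec : Claim_equal_leaf_py := by
  intro i j first maxfirst prevleaf ancestor _ _
  unfold Spec_leaf_py leaf_py leaf_py_alt
  by_cases h1 : i ≤ j ∨ (PySem.List.pyGet? first j).getD 0 ≤ (PySem.List.pyGet? maxfirst i).getD 0
  · simp [h1]
  · simp only [h1, if_false]
    by_cases h2 : (PySem.List.pyGet? prevleaf i).getD 0 = -1
    · simp [h2]
    · simp [h2, pvRootLoopA_eq_findB]
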